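-- pv_equiv track=rewrite | github.com/ramlec1/ctypes_in_python | cpython.py | pyloop
-- ===== SOURCE A (Python) =====
-- def pyloop(n):
--     ''' Arbitrary python loop for time comparisson with c-loop.'''
--     count = 1
--     for i in range(1,n):
--         if i%2==0:
--             count += 5
--         if i%2==1:
--             count -= 5
--     return count
-- ===== SOURCE B (Python) =====
-- def pyloop(n):
--     ''' Closed form: evens and odds in [1, n-1] pair off to 0; only a
--     trailing odd element survives when n is even and >= 2.'''
--     return -4 if n >= 2 and n % 2 == 0 else 1
-- ===== Notes on version B (the rewrite author's own statement) =====
-- stated objective: faster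
-- what changed: Replaced the O(n) loop over range(1,n) by a closed-form case formula (evens/odds in [1,n-1] cancel; a trailing odd survives iff n is even and >= 2).
import Mathlib
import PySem

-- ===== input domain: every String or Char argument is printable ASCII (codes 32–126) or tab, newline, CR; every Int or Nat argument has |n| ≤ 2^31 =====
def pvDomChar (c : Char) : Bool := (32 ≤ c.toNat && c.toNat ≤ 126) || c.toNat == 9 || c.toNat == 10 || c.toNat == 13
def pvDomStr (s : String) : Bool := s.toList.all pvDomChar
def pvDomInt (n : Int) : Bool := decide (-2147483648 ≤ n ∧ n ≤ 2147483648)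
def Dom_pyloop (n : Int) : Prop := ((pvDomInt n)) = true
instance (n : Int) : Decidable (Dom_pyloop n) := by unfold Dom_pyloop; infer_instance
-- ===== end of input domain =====

-- B replaces A's O(n) loop by an O(1) closed-form case formula (objective: faster, asymptotic).

-- ===== PORT A =====
def pyloop (n : Int) : Int :=
  (PySem.List.pyRange 1 n 1).foldl
    (fun count i =>
      let count := if PySem.Int.mod i 2 == 0 then count + 5 else count
      if PySem.Int.mod i 2 == 1 then count - 5 else count)
    1

-- ===== PORT B =====
def pyloop_alt (n : Int) : Int :=
  if 2 ≤ n ∧ PySem.Int.mod n 2 == 0 then -4 else 1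

-- ===== PRECONDITION & SPEC =====
def Spec_pyloop (n : Int) (out : Int) : Prop := out = pyloop_alt n
instance (n : Int) (out : Int) : Decidable (Spec_pyloop n out) := by unfold Spec_pyloop; infer_instance

-- ===== CLAIM (what is proved, stated in full; the proofs are below) =====
def Claim_equal_pyloop : Prop := ∀ (n : Int), Dom_pyloop n → Spec_pyloop n (pyloop n)

-- ===== LEMMAS AND PROOFS =====

theorem pyloop_succ_nat (k : Nat) : pyloop ((k : Int) + 1) = pyloop_alt ((k : Int) + 1) := by
  induction k with
  | zero => decide
  | succ m ih =>
    unfold pyloop at ih ⊢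
    push_cast
    rw [show ((m : Int) + 1 + 1) = ((m : Int) + 1) + 1 by ring,
        PySem.List.pyRange_one_succ_right (by omega : (1:Int) ≤ (m : Int) + 1),
        List.foldl_append]
    simp only [List.foldl_cons, List.foldl_nil]
    rw [ih]
    unfold pyloop_alt
    simp only [PySem.Int.mod, Int.fmod_eq_emod, beq_iff_eq]
    split_ifs <;> omega

-- ===== VERDICT (by name: the statement is the Claim_ definition above) =====
theorem pyloop_spec : Claim_equal_pyloop := by
  intro n _
  unfold Spec_pyloop
  by_cases h : n ≤ 1
  · rw [pyloop, PySem.List.pyRange_one_eq_nil h, List.foldl_nil, pyloop_alt]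
    rw [if_neg (by rintro ⟨h2, _⟩; omega)]
  · obtain ⟨k, hk⟩ : ∃ k : Nat, n = (k : Int) + 1 :=
      ⟨(n - 1).toNat, by omega⟩
    rw [hk]; exact pyloop_succ_nat k
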